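-- pv_equiv track=rewrite | github.com/janschmiedgen/n8n-video-editing-pipeline | n8n-video-api.py | extract_caption_params
-- ===== SOURCE A (Python) =====
-- def extract_caption_params(captiontemplate):
--     """
--     Parse captiontemplate string like 'landscape_fancy.ass -style social'
--     Returns: (template, style, brand)
--     """
--     if not captiontemplate:
--         return None, 'clean', 'codify'  # defaults
--
--     parts = captiontemplate.split()
--     template = None
--     style = 'clean'
--     brand = 'codify'
--
--     # Find template file
--     for i, part in enumerate(parts):
--         if part.endswith('.ass'):
--             template = part
--             break
--
--     # Find style parameter
--     try:
--         style_index = parts.index('-style')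
--         if style_index + 1 < len(parts):
--             style = parts[style_index + 1]
--     except ValueError:
--         pass  # -style not found, use default
--
--     # Find brand parameter
--     try:
--         brand_index = parts.index('-brand')
--         if brand_index + 1 < len(parts):
--             brand = parts[brand_index + 1]
--     except ValueError:
--         pass  # -brand not found, use default
--
--     return template, style, brand
-- ===== SOURCE B (Python) =====
-- def extract_caption_params(captiontemplate):
--     """
--     Parse captiontemplate string like 'landscape_fancy.ass -style social'
--     Returns: (template, style, brand)
--     """
--     if not captiontemplate:
--         return None, 'clean', 'codify'  # defaults
--
--     parts = captiontemplate.split()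
--     template = None
--     style = 'clean'
--     brand = 'codify'
--     style_seen = False
--     brand_seen = False
--
--     # Single forward pass: first '.ass' token, first '-style'/'-brand' flags
--     for i, part in enumerate(parts):
--         if template is None and part.endswith('.ass'):
--             template = part
--         if part == '-style' and not style_seen:
--             style_seen = True
--             if i + 1 < len(parts):
--                 style = parts[i + 1]
--         if part == '-brand' and not brand_seen:
--             brand_seen = True
--             if i + 1 < len(parts):
--                 brand = parts[i + 1]
--     return template, style, brand
-- ===== Notes on version B (the rewrite author's own statement) =====
-- stated objective: alternative
-- what changed: Replaces A's three separate traversals (a break-on-first loop for the '.ass' template plus two list.index scans with guarded lookups) by one single forward pass carrying style_seen/brand_seen flags and committing each field at its first occurrence.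
import Mathlib
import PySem

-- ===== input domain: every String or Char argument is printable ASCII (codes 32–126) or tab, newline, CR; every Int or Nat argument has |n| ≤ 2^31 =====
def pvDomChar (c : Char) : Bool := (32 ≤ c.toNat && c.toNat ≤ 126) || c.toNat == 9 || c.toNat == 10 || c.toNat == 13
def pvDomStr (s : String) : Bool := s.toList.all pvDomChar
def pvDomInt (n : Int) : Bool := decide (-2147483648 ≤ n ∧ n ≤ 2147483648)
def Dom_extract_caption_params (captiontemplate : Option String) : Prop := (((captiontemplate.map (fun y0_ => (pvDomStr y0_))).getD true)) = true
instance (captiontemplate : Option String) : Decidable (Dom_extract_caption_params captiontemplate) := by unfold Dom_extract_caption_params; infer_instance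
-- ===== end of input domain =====

-- B replaces A's three traversals (break-loop + two list.index scans) by one forward pass with seen-flags; objective: alternative decomposition.

-- ===== PORT A =====
-- the 'for i, part in enumerate(parts): if part.endswith('.ass'): template = part; break' loop
def findTemplate : List String → Option String
  | [] => none
  | part :: rest => if PySem.Str.endswith part ".ass" then some part else findTemplate rest

def extract_caption_params (captiontemplate : Option String) : Option String × String × String :=
  match captiontemplate with
  | none => (none, "clean", "codify")
  | some s =>
    if s = "" then (none, "clean", "codify")
    else
      let parts := PySem.Str.split₀ s
      let template := findTemplate parts
      let style := match PySem.List.index? parts "-style" with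
        | some style_index =>
            if style_index + 1 < parts.length then parts.getD (style_index + 1) "clean" else "clean"
        | none => "clean"
      let brand := match PySem.List.index? parts "-brand" with
        | some brand_index =>
            if brand_index + 1 < parts.length then parts.getD (brand_index + 1) "codify" else "codify"
        | none => "codify"
      (template, style, brand)

-- ===== PORT B =====
-- B's single forward pass; 'i + 1 < len(parts)' / 'parts[i+1]' becomes the lookahead 'rest.headD'
def ecpLoop : List String → Option String → String → String → Bool → Bool → Option String × String × String
  | [], template, style, brand, _, _ => (template, style, brand)
  | part :: rest, template, style, brand, styleSeen, brandSeen =>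
    let template' := if template.isNone && PySem.Str.endswith part ".ass" then some part else template
    let style' := if part == "-style" && !styleSeen then rest.headD style else style
    let styleSeen' := styleSeen || part == "-style"
    let brand' := if part == "-brand" && !brandSeen then rest.headD brand else brand
    let brandSeen' := brandSeen || part == "-brand"
    ecpLoop rest template' style' brand' styleSeen' brandSeen'

def extract_caption_params_alt (captiontemplate : Option String) : Option String × String × String :=
  match captiontemplate with
  | none => (none, "clean", "codify")
  | some s =>
    if s = "" then (none, "clean", "codify")
    else ecpLoop (PySem.Str.split₀ s) none "clean" "codify" false false

-- ===== PRECONDITION & SPEC =====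
def Spec_extract_caption_params (captiontemplate : Option String) (out : Option String × String × String) : Prop := out = extract_caption_params_alt captiontemplate
instance (captiontemplate : Option String) (out : Option String × String × String) : Decidable (Spec_extract_caption_params captiontemplate out) := by unfold Spec_extract_caption_params; infer_instance

-- ===== CLAIM (what is proved, stated in full; the proofs are below) =====
def Claim_equal_extract_caption_params : Prop := ∀ (captiontemplate : Option String), Dom_extract_caption_params captiontemplate → Spec_extract_caption_params captiontemplate (extract_caption_params captiontemplate)

-- ===== LEMMAS AND PROOFS =====

-- value after the first occurrence of flag v (or d if absent / flag is last)
def flagVal (v : String) : List String → String → String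
  | [], d => d
  | p :: rest, d => if p = v then rest.headD d else flagVal v rest d

theorem ecpLoop_eq (parts : List String) : ∀ (t : Option String) (st br : String) (ss bs : Bool),
    ecpLoop parts t st br ss bs =
      (t.or (findTemplate parts),
       (if ss then st else flagVal "-style" parts st),
       (if bs then br else flagVal "-brand" parts br)) := by
  induction parts with
  | nil => intro t st br ss bs; cases t <;> cases ss <;> cases bs <;> simp [ecpLoop, findTemplate, flagVal]
  | cons p rest ih =>
    intro t st br ss bs
    simp only [ecpLoop, ih, findTemplate, flagVal]
    cases t <;> cases ss <;> cases bs <;>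
      by_cases h1 : p = "-style" <;> by_cases h2 : p = "-brand" <;>
      simp [h1, h2] <;> split_ifs <;> simp_all

theorem flagVal_eq (v : String) (parts : List String) : ∀ (d : String),
    flagVal v parts d =
      (match PySem.List.index? parts v with
       | some i => if i + 1 < parts.length then parts.getD (i + 1) d else d
       | none => d) := by
  induction parts with
  | nil => intro d; simp [flagVal, PySem.List.index?]
  | cons p rest ih =>
    intro d
    by_cases h : p = v
    · subst h
      rw [flagVal, if_pos rfl, PySem.List.index?_cons_self]
      cases rest <;> simp [List.getD]
    · rw [flagVal, if_neg h, PySem.List.index?_cons_of_ne rest h, ih d]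
      cases hix : PySem.List.index? rest v with
      | none => simp
      | some k =>
        simp only [Option.map_some]
        rcases Nat.lt_or_ge (k + 1) rest.length with hlt | hge
        · rw [if_pos hlt, if_pos (by simp; omega)]; simp [List.getD]
        · rw [if_neg (Nat.not_lt.mpr hge), if_neg (by simp; omega)]

-- ===== VERDICT (by name: the statement is the Claim_ definition above) =====
theorem extract_caption_params_spec : Claim_equal_extract_caption_params := by
  intro captiontemplate _
  unfold Spec_extract_caption_params extract_caption_params extract_caption_params_alt
  cases captiontemplate with
  | none => rfl
  | some s =>
    by_cases hs : s = ""
    · simp [hs]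
    · simp only [if_neg hs]
      rw [ecpLoop_eq, flagVal_eq, flagVal_eq]
      simp
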